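-- pv_equiv track=rewrite | github.com/athifashaffy/eveolved26-hackathon | src/train_models.py | define_feature_sets
-- ===== SOURCE A (Python) =====
-- def define_feature_sets(feature_names, top_autoresearch_features):
--     """Define different feature sets for comparison."""
--     # Standard features (what everyone uses — just mean levels)
--     standard = [f for f in feature_names if "_mean" in f and not f.endswith("_mean_std")]
--
--     # Temporal dynamics (our novel features — CV, autocorr, std, slope)
--     temporal = [f for f in feature_names if any(s in f for s in ["_cv", "_autocorr", "_std", "_slope"])]
--
--     # Top autoresearch discoveries (from the overnight run)
--     autoresearch_top = [f for f in top_autoresearch_features if f in feature_names][:30]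
--
--     # All features
--     all_feats = feature_names
--
--     # Sleep only
--     sleep = [f for f in feature_names if f.startswith("sleep_")]
--
--     # HRV only
--     hrv = [f for f in feature_names if f.startswith(("rmssd_", "hr_", "lfhf_"))]
--
--     # Critical slowing down features specifically
--     csd = [f for f in feature_names if any(s in f for s in ["_autocorr", "_cv"]) and
--            f.startswith(("rmssd_", "hr_"))]
--
--     return {
--         "standard_means": standard,
--         "temporal_dynamics": temporal,
--         "autoresearch_top30": autoresearch_top,
--         "all_features": all_feats,
--         "sleep_only": sleep,
--         "hrv_only": hrv,
--         "critical_slowing_down": csd,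
--     }
-- ===== SOURCE B (Python) =====
-- _GROUP_KEYS = ("standard_means", "temporal_dynamics", "sleep_only", "hrv_only",
--                "critical_slowing_down")
--
--
-- def _tags(f):
--     """Classify one feature name into the group keys it belongs to."""
--     tags = []
--     if "_mean" in f and not f.endswith("_mean_std"):
--         tags.append("standard_means")
--     cv_ac = "_cv" in f or "_autocorr" in f
--     if cv_ac or "_std" in f or "_slope" in f:
--         tags.append("temporal_dynamics")
--     if f.startswith("sleep_"):
--         tags.append("sleep_only")
--     rh = f.startswith("rmssd_") or f.startswith("hr_")
--     if rh or f.startswith("lfhf_"):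
--         tags.append("hrv_only")
--     if cv_ac and rh:
--         tags.append("critical_slowing_down")
--     return tags
--
--
-- def define_feature_sets(feature_names, top_autoresearch_features):
--     """Define different feature sets for comparison (classify each feature once,
--     group the tagged features into a multimap, then read the buckets out)."""
--     groups = {}
--     for f in feature_names:
--         for k in _tags(f):
--             groups.setdefault(k, []).append(f)
--
--     name_set = set(feature_names)
--     autoresearch_top = []
--     for f in top_autoresearch_features:
--         if len(autoresearch_top) >= 30:
--             break
--         if f in name_set:
--             autoresearch_top.append(f)
--
--     return {
--         "standard_means": groups.get("standard_means", []),
--         "temporal_dynamics": groups.get("temporal_dynamics", []),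
--         "autoresearch_top30": autoresearch_top,
--         "all_features": feature_names,
--         "sleep_only": groups.get("sleep_only", []),
--         "hrv_only": groups.get("hrv_only", []),
--         "critical_slowing_down": groups.get("critical_slowing_down", []),
--     }
-- ===== Notes on version B (the rewrite author's own statement) =====
-- stated objective: faster
-- what changed: A filters feature_names once per group (six comprehensions, plus a list-membership scan sliced to 30); B inverts the structure: it classifies each feature exactly once into a list of tag keys and groups the tagged features into a dict multimap (groups.setdefault(k, []).append(f)), reading the buckets out at the end, and computes autoresearch_top with a prebuilt set and an early break after 30 hits instead of filter-then-slice.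
import Mathlib
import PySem

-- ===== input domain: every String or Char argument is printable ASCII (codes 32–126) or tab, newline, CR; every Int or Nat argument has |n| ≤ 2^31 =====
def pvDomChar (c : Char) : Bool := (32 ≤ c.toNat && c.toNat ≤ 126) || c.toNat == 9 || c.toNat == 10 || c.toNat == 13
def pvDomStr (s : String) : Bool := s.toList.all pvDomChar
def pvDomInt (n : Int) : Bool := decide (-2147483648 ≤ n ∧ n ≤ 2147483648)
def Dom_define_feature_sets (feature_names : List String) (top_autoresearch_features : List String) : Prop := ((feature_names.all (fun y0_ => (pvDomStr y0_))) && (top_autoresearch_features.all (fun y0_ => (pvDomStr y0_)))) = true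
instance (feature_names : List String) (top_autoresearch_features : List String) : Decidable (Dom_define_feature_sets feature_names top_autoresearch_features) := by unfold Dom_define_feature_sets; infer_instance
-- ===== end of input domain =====

-- B inverts A's per-group filtering: each feature is classified once into tag keys and grouped
-- into a dict multimap, and autoresearch_top uses a set with an early break (measured faster).


-- ===== PORT A =====
def define_feature_sets (feature_names : List String) (top_autoresearch_features : List String) : List (String × List String) :=
  let standard := feature_names.filter (fun f => PySem.Str.isIn "_mean" f && !(PySem.Str.endswith f "_mean_std"))
  let temporal := feature_names.filter (fun f => ["_cv", "_autocorr", "_std", "_slope"].any (fun s => PySem.Str.isIn s f))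
  let autoresearch_top := PySem.List.slice (top_autoresearch_features.filter (fun f => f ∈ feature_names)) none (some 30)
  let all_feats := feature_names
  let sleep := feature_names.filter (fun f => PySem.Str.startswith f "sleep_")
  let hrv := feature_names.filter (fun f => ["rmssd_", "hr_", "lfhf_"].any (fun p => PySem.Str.startswith f p))
  let csd := feature_names.filter (fun f =>
    (["_autocorr", "_cv"].any (fun s => PySem.Str.isIn s f)) && (["rmssd_", "hr_"].any (fun p => PySem.Str.startswith f p)))
  [("standard_means", standard),
   ("temporal_dynamics", temporal),
   ("autoresearch_top30", autoresearch_top),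
   ("all_features", all_feats),
   ("sleep_only", sleep),
   ("hrv_only", hrv),
   ("critical_slowing_down", csd)]

-- ===== PORT B =====
-- _tags(f): the list of group keys one feature belongs to
def pvTags (f : String) : List String :=
  let cv_ac := PySem.Str.isIn "_cv" f || PySem.Str.isIn "_autocorr" f
  let rh := PySem.Str.startswith f "rmssd_" || PySem.Str.startswith f "hr_"
  (if PySem.Str.isIn "_mean" f && !(PySem.Str.endswith f "_mean_std") then ["standard_means"] else []) ++
  (if cv_ac || PySem.Str.isIn "_std" f || PySem.Str.isIn "_slope" f then ["temporal_dynamics"] else []) ++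
  (if PySem.Str.startswith f "sleep_" then ["sleep_only"] else []) ++
  (if rh || PySem.Str.startswith f "lfhf_" then ["hrv_only"] else []) ++
  (if cv_ac && rh then ["critical_slowing_down"] else [])

-- groups.setdefault(k, []).append(f) over all tags of all features (= d.modify k [] (· ++ [f]))
def pvGroups (feature_names : List String) : PySem.Dict String (List String) :=
  feature_names.foldl (fun d f => (pvTags f).foldl (fun d k => d.modify k [] (· ++ [f])) d) PySem.Dict.empty

-- early-stopping scan for autoresearch_top (B's second loop)
def pvBTop (name_set : PySem.Set String) : List String → List String → List String
  | acc, [] => acc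
  | acc, f :: rest =>
    if 30 ≤ acc.length then acc
    else if name_set.contains f then pvBTop name_set (acc ++ [f]) rest
    else pvBTop name_set acc rest

def define_feature_sets_alt (feature_names : List String) (top_autoresearch_features : List String) : List (String × List String) :=
  let groups := pvGroups feature_names
  let name_set := PySem.Set.ofList feature_names
  let autoresearch_top := pvBTop name_set [] top_autoresearch_features
  [("standard_means", groups.getD "standard_means" []),
   ("temporal_dynamics", groups.getD "temporal_dynamics" []),
   ("autoresearch_top30", autoresearch_top),
   ("all_features", feature_names),
   ("sleep_only", groups.getD "sleep_only" []),
   ("hrv_only", groups.getD "hrv_only" []),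
   ("critical_slowing_down", groups.getD "critical_slowing_down" [])]

-- ===== PRECONDITION & SPEC =====
def Spec_define_feature_sets (feature_names : List String) (top_autoresearch_features : List String) (out : List (String × List String)) : Prop := out = define_feature_sets_alt feature_names top_autoresearch_features
instance (feature_names : List String) (top_autoresearch_features : List String) (out : List (String × List String)) : Decidable (Spec_define_feature_sets feature_names top_autoresearch_features out) := by unfold Spec_define_feature_sets; infer_instance

-- ===== CLAIM (what is proved, stated in full; the proofs are below) =====
def Claim_equal_define_feature_sets : Prop := ∀ (feature_names : List String) (top_autoresearch_features : List String), Dom_define_feature_sets feature_names top_autoresearch_features → Spec_define_feature_sets feature_names top_autoresearch_features (define_feature_sets feature_names top_autoresearch_features)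

-- ===== LEMMAS AND PROOFS =====

-- the nested (feature, tag) loop is the flat loop over all (tag, feature) pairs
theorem pvGroups_eq_pairs (fn : List String) :
    pvGroups fn =
      (fn.flatMap (fun f => (pvTags f).map (fun k => (k, f)))).foldl
        (fun d p => d.modify p.1 [] (· ++ [p.2])) PySem.Dict.empty := by
  unfold pvGroups
  generalize PySem.Dict.empty = d
  induction fn generalizing d with
  | nil => rfl
  | cons f rest ih =>
    simp only [List.foldl_cons, List.flatMap_cons, List.foldl_append, List.foldl_map, ih]

-- filtering one tag segment '(if b then [k] else [])' at key c
theorem pvFilterSeg (b : Bool) (k f c : String) :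
    List.filter (fun q => q.1 == c) (List.map (fun k => (k, f)) (if b then [k] else [])) =
      if b ∧ k = c then [(k, f)] else [] := by
  cases b <;> simp [List.filter_singleton]

theorem pvTags_std (f : String) :
    ((pvTags f).map (fun k => (k, f))).filter (fun q => q.1 == "standard_means") =
      if PySem.Str.isIn "_mean" f && !(PySem.Str.endswith f "_mean_std") then [("standard_means", f)] else [] := by
  unfold pvTags
  simp only [List.map_append, List.filter_append, pvFilterSeg]
  simp

theorem pvTags_temporal (f : String) :
    ((pvTags f).map (fun k => (k, f))).filter (fun q => q.1 == "temporal_dynamics") =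
      if ["_cv", "_autocorr", "_std", "_slope"].any (fun s => PySem.Str.isIn s f) then [("temporal_dynamics", f)] else [] := by
  unfold pvTags
  simp only [List.map_append, List.filter_append, pvFilterSeg, List.any_cons, List.any_nil]
  simp [Bool.or_assoc]

theorem pvTags_sleep (f : String) :
    ((pvTags f).map (fun k => (k, f))).filter (fun q => q.1 == "sleep_only") =
      if PySem.Str.startswith f "sleep_" then [("sleep_only", f)] else [] := by
  unfold pvTags
  simp only [List.map_append, List.filter_append, pvFilterSeg]
  simp

theorem pvTags_hrv (f : String) :
    ((pvTags f).map (fun k => (k, f))).filter (fun q => q.1 == "hrv_only") =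
      if ["rmssd_", "hr_", "lfhf_"].any (fun p => PySem.Str.startswith f p) then [("hrv_only", f)] else [] := by
  unfold pvTags
  simp only [List.map_append, List.filter_append, pvFilterSeg, List.any_cons, List.any_nil]
  simp [Bool.or_assoc]

theorem pvTags_csd (f : String) :
    ((pvTags f).map (fun k => (k, f))).filter (fun q => q.1 == "critical_slowing_down") =
      if (["_autocorr", "_cv"].any (fun s => PySem.Str.isIn s f)) &&
         (["rmssd_", "hr_"].any (fun p => PySem.Str.startswith f p)) then [("critical_slowing_down", f)] else [] := by
  unfold pvTags
  simp only [List.map_append, List.filter_append, pvFilterSeg, List.any_cons, List.any_nil]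
  simp [Bool.or_comm]

-- bucket c of the multimap is the filter of fn by predicate p
theorem pvGroups_getD (fn : List String) (c : String) (p : String → Bool)
    (h : ∀ f, ((pvTags f).map (fun k => (k, f))).filter (fun q => q.1 == c) =
         if p f then [(c, f)] else []) :
    (pvGroups fn).getD c [] = fn.filter p := by
  rw [pvGroups_eq_pairs, PySem.Dict.getD_foldl_modify_append, PySem.Dict.getD_empty]
  simp only [List.nil_append, List.filter_flatMap, List.map_flatMap]
  induction fn with
  | nil => rfl
  | cons f rest ih =>
    simp only [List.flatMap_cons, List.filter_cons]
    rw [ih]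
    have hf := h f
    simp only [hf]
    by_cases hp : p f = true <;> simp [hp]

-- membership in the built set is membership in feature_names
theorem pvSetContains (fn : List String) (f : String) :
    (PySem.Set.ofList fn).contains f = decide (f ∈ fn) := by
  simp [PySem.Set.contains_eq_listContains]

-- B's early-stopping scan equals filter-then-take
theorem pvBTop_eq (fn : List String) (xs acc : List String) :
    pvBTop (PySem.Set.ofList fn) acc xs =
      acc ++ (xs.filter (fun f => f ∈ fn)).take (30 - acc.length) := by
  induction xs generalizing acc with
  | nil => simp [pvBTop]
  | cons f rest ih =>
    simp only [pvBTop, List.filter_cons]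
    by_cases h30 : 30 ≤ acc.length
    · have : 30 - acc.length = 0 := by omega
      simp [h30, this]
    · have hsplit : 30 - acc.length = (30 - (acc.length + 1)) + 1 := by omega
      rw [pvSetContains]
      by_cases hm : f ∈ fn
      · simp only [hm, decide_true, if_false, h30, ih]
        rw [hsplit]
        simp [List.take_succ_cons]
      · simp [h30, hm, ih]

theorem define_feature_sets_eq (fn top : List String) :
    define_feature_sets fn top = define_feature_sets_alt fn top := by
  unfold define_feature_sets define_feature_sets_alt
  dsimp only
  rw [pvBTop_eq, PySem.List.slice_to]
  rw [pvGroups_getD fn "standard_means" _ pvTags_std,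
      pvGroups_getD fn "temporal_dynamics" _ pvTags_temporal,
      pvGroups_getD fn "sleep_only" _ pvTags_sleep,
      pvGroups_getD fn "hrv_only" _ pvTags_hrv,
      pvGroups_getD fn "critical_slowing_down" _ pvTags_csd]
  simp
  norm_num

-- ===== VERDICT (by name: the statement is the Claim_ definition above) =====
theorem define_feature_sets_spec : Claim_equal_define_feature_sets := by
  intro fn top _
  unfold Spec_define_feature_sets
  exact define_feature_sets_eq fn top
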